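-- pv_equiv track=rewrite | github.com/Clickatell4/Pss-backendN | pss_backend/exceptions.py | _contains_sensitive_info
-- ===== SOURCE A (Python) =====
-- def _contains_sensitive_info(message):
--     """
--     Check if a message potentially contains sensitive information.
--
--     Args:
--         message: The message string to check
--
--     Returns:
--         True if message may contain sensitive info, False otherwise
--     """
--     if not isinstance(message, str):
--         return True
--
--     sensitive_patterns = [
--         # File paths
--         '/', '\\', '.py', '.sql',
--         # Database info
--         'psycopg', 'django.db', 'SELECT', 'INSERT', 'UPDATE', 'DELETE',
--         'column', 'table', 'relation', 'constraint',
--         # Stack traces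
--         'Traceback', 'File "', 'line ', 'raise ',
--         # Internal details
--         'NoneType', 'AttributeError', 'KeyError', 'TypeError',
--         'IndexError', 'ValueError', 'IntegrityError',
--         # Secrets
--         'key', 'token', 'secret', 'password', 'credential',
--     ]
--
--     message_lower = message.lower()
--     return any(pattern.lower() in message_lower for pattern in sensitive_patterns)
-- ===== SOURCE B (Python) =====
-- # Window-hash scan: patterns parsed from one '|'-joined lowered string into a set;
-- # at each position we slice windows of each distinct pattern length and test
-- # set membership, instead of one full substring scan per pattern (alternative).
--
-- _PATTERN_SET = set(
--     '/|\\|.py|.sql|psycopg|django.db|select|insert|update|delete|'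
--     'column|table|relation|constraint|traceback|file "|line |raise |'
--     'nonetype|attributeerror|keyerror|typeerror|indexerror|valueerror|'
--     'integrityerror|key|token|secret|password|credential'.split('|')
-- )
-- _LENGTHS = sorted({len(p) for p in _PATTERN_SET})
--
--
-- def _contains_sensitive_info(message):
--     if not isinstance(message, str):
--         return True
--     m = message.lower()
--     n = len(m)
--     for i in range(n):
--         for L in _LENGTHS:
--             if i + L <= n and m[i:i + L] in _PATTERN_SET:
--                 return True
--     return False
-- ===== Notes on version B (the rewrite author's own statement) =====
-- stated objective: alternative
-- what changed: B parses the patterns from one joined string into a set plus its distinct lengths, then makes a single positional scan of the lowered message testing fixed-length windows for set membership, instead of A's per-pattern full substring scans.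
import Mathlib
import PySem

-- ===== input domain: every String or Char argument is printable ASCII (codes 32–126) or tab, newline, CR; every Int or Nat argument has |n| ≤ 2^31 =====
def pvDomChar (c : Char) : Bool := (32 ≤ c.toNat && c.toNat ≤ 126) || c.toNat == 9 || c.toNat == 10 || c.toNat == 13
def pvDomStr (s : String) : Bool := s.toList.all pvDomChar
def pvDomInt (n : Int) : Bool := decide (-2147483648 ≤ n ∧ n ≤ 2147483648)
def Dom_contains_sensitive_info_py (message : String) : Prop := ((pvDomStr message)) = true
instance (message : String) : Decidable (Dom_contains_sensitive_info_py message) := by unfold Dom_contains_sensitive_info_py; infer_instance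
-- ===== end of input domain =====

-- B parses the patterns from one joined string into a set plus its distinct lengths and makes a
-- single positional scan testing fixed-length windows for set membership (alternative; return value only).

-- ===== PORT A =====
-- A's literal pattern list (mixed case, as in the source)
def pvSensitivePatterns : List String :=
  ["/", "\\", ".py", ".sql", "psycopg", "django.db", "SELECT", "INSERT", "UPDATE", "DELETE",
   "column", "table", "relation", "constraint", "Traceback", "File \"", "line ", "raise ",
   "NoneType", "AttributeError", "KeyError", "TypeError", "IndexError", "ValueError",
   "IntegrityError", "key", "token", "secret", "password", "credential"]

def contains_sensitive_info_py (message : String) : Bool :=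
  let message_lower := PySem.Str.lower message
  pvSensitivePatterns.any (fun pattern => PySem.Str.isIn (PySem.Str.lower pattern) message_lower)

-- ===== PORT B =====
-- Source B's module constants: one '|'-joined lowered source string, split into a set,
-- and the sorted distinct pattern lengths.
def pvPatternSrc : String :=
  "/|\\|.py|.sql|psycopg|django.db|select|insert|update|delete|column|table|relation|constraint|traceback|file \"|line |raise |nonetype|attributeerror|keyerror|typeerror|indexerror|valueerror|integrityerror|key|token|secret|password|credential"

def pvPatternSet : PySem.Set (List Char) :=
  PySem.Set.ofList ((PySem.Chars.splitOn pvPatternSrc.toList "|".toList))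

def pvLengths : List Nat :=
  PySem.List.sorted (PySem.Set.ofList (pvPatternSet.map List.length)) (fun x => x) false

-- the inner 'for L in _LENGTHS: if i+L<=n and m[i:i+L] in _PATTERN_SET'
def pvWindowHit (t : List Char) : Bool :=
  pvLengths.any fun L => decide (L ≤ t.length) && PySem.Set.contains pvPatternSet (t.take L)

-- the outer 'for i in range(n)': recursion over the suffixes of the lowered message
def pvScanW : List Char → Bool
  | [] => false
  | a :: t => pvWindowHit (a :: t) || pvScanW t

def contains_sensitive_info_py_alt (message : String) : Bool :=
  pvScanW (PySem.Chars.lower message.toList)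

-- ===== PRECONDITION & SPEC =====
def Spec_contains_sensitive_info_py (message : String) (out : Bool) : Prop := out = contains_sensitive_info_py_alt message
instance (message : String) (out : Bool) : Decidable (Spec_contains_sensitive_info_py message out) := by unfold Spec_contains_sensitive_info_py; infer_instance

-- ===== CLAIM (what is proved, stated in full; the proofs are below) =====
def Claim_equal_contains_sensitive_info_py : Prop := ∀ (message : String), Dom_contains_sensitive_info_py message → Spec_contains_sensitive_info_py message (contains_sensitive_info_py message)

-- ===== LEMMAS AND PROOFS =====
set_option maxRecDepth 200000

-- the parsed constants, evaluated once (kernel-checked)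
theorem pvLengths_eq : pvLengths = [1, 3, 4, 5, 6, 7, 8, 9, 10, 14] := by decide

-- A's runtime-lowered patterns coincide with B's parsed set (as char lists, same order)
theorem pvPatterns_lower_eq :
    pvSensitivePatterns.map (fun p => PySem.Chars.lower p.toList) = pvPatternSet := by decide

theorem pvMem_lengths : ∀ p ∈ pvPatternSet, p.length ∈ pvLengths := by
  rw [← pvPatterns_lower_eq, pvLengths_eq]; decide

theorem pvNe_nil : ∀ p ∈ pvPatternSet, p ≠ [] := by
  rw [← pvPatterns_lower_eq]; decide

-- a window hit at the head of t is exactly 'some pattern of the set is a prefix of t'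
theorem pvWindowHit_iff (t : List Char) :
    pvWindowHit t = true ↔ ∃ p ∈ pvPatternSet, p <+: t := by
  unfold pvWindowHit
  simp only [List.any_eq_true, Bool.and_eq_true, decide_eq_true_eq]
  constructor
  · rintro ⟨L, _, hL, hmem⟩
    refine ⟨t.take L, ?_, List.take_prefix L t⟩
    simpa [PySem.Set.contains] using hmem
  · rintro ⟨p, hp, hpre⟩
    refine ⟨p.length, ?_, hpre.length_le, ?_⟩
    · exact pvMem_lengths p hp
    · have ht : t.take p.length = p := (List.prefix_iff_eq_take.mp hpre).symm
      simpa [PySem.Set.contains, ht] using hp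

-- the positional scan finds a hit iff some pattern of the set is an infix (no pattern is empty)
theorem pvScanW_eq_any_isIn :
    ∀ l, pvScanW l = pvPatternSet.any (fun p => PySem.Chars.isIn p l) := by
  intro l
  induction l with
  | nil =>
    simp only [pvScanW]
    symm
    rw [List.any_eq_false]
    intro p hp
    rw [PySem.Chars.isIn_iff_infix, List.infix_nil]
    exact pvNe_nil p hp
  | cons a t ih =>
    rw [pvScanW, ih, Bool.eq_iff_iff]
    simp only [Bool.or_eq_true, List.any_eq_true, PySem.Chars.isIn_iff_infix,
      List.infix_cons_iff, pvWindowHit_iff]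
    constructor
    · rintro (⟨p, hp, hpre⟩ | ⟨p, hp, hinf⟩)
      · exact ⟨p, hp, Or.inl hpre⟩
      · exact ⟨p, hp, Or.inr hinf⟩
    · rintro ⟨p, hp, hpre | hinf⟩
      · exact Or.inl ⟨p, hp, hpre⟩
      · exact Or.inr ⟨p, hp, hinf⟩

-- ===== VERDICT (by name: the statement is the Claim_ definition above) =====
theorem contains_sensitive_info_py_spec : Claim_equal_contains_sensitive_info_py := by
  intro message _
  unfold Spec_contains_sensitive_info_py contains_sensitive_info_py contains_sensitive_info_py_alt
  rw [pvScanW_eq_any_isIn, ← pvPatterns_lower_eq, List.any_map]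
  simp [Function.comp_def, PySem.Str.isIn, PySem.Str.lower]
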